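-- pv_equiv track=rewrite | github.com/yorozuya-2003/autonomous-systems-assignments | implementing-vgc-mechanism/helpers.py | items_to_bidders_mapping
-- ===== SOURCE A (Python) =====
-- from itertools import combinations
--
-- def items_to_bidders_mapping(n, bidder_mapping, items):
--     items_to_bidders = {}
--
--     for comb in range(1, n + 1):
--         for item_comb in combinations(items, comb):
--             item_key = "_and_".join(sorted(item_comb, reverse=True))
--             items_to_bidders[item_key] = []
--
--     for bidder, bids in bidder_mapping.items():
--         for bid_key, bid_info in bids.items():
--             bid_items_key = "_and_".join(sorted(bid_info["items"], reverse=True))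
--             if bid_items_key in items_to_bidders:
--                 items_to_bidders[bid_items_key].append((bidder, bid_key))
--
--     return items_to_bidders
-- ===== SOURCE B (Python) =====
-- def items_to_bidders_mapping(n, bidder_mapping, items):
--     # Group all bids by their item-set key in one pass, then emit keys by
--     # layered (BFS) combination generation instead of itertools.combinations.
--     groups = {}
--     for bidder, bids in bidder_mapping.items():
--         for bid_key, bid_info in bids.items():
--             key = "_and_".join(sorted(bid_info["items"], reverse=True))
--             groups.setdefault(key, []).append((bidder, bid_key))
--
--     result = {}
--     frontier = [([], items)]  # (chosen prefix, remaining suffix)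
--     rounds = 0
--     while frontier and rounds < n:
--         rounds += 1
--         nxt = []
--         for combo, rest in frontier:
--             for j, x in enumerate(rest):
--                 key = "_and_".join(sorted(combo + [x], reverse=True))
--                 result[key] = groups.get(key, [])
--                 nxt.append((combo + [x], rest[j + 1:]))
--         frontier = nxt
--     return result
-- ===== Notes on version B (the rewrite author's own statement) =====
-- stated objective: alternative
-- what changed: Replaces the itertools.combinations enumeration with a layered breadth-first frontier of (prefix, remaining-suffix) pairs that stops as soon as the frontier empties, and replaces the membership-guarded append loop by grouping all bids by their item key once and filling each key from that index.
import Mathlib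
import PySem

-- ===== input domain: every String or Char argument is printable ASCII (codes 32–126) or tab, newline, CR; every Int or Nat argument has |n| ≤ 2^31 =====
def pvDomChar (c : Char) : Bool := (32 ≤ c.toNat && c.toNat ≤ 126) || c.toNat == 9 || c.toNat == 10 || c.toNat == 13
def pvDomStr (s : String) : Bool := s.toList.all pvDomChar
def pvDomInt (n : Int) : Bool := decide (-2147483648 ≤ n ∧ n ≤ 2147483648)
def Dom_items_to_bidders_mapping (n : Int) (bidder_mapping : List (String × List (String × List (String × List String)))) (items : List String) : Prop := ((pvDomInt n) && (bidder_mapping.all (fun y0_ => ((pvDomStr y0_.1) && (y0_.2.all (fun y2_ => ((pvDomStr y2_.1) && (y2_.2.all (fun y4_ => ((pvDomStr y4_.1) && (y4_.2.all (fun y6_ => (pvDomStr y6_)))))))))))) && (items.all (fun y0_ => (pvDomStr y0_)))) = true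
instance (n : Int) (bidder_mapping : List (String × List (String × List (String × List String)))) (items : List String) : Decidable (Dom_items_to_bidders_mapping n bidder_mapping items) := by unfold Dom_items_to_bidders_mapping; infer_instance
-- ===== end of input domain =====

-- B replaces the itertools.combinations enumeration by a layered frontier of
-- (prefix, suffix) pairs that stops when it empties, and replaces the
-- membership-guarded append loop by a group-by-key dict built in one pass
-- (objective: alternative decomposition, same return value).

-- ===== PORT A =====
-- "_and_".join(sorted(l, reverse=True))
def pvKey (l : List String) : String := PySem.Str.join "_and_" (PySem.List.sorted l (fun x => x) true)

def items_to_bidders_mapping (n : Int) (bidder_mapping : List (String × List (String × List (String × List String)))) (items : List String) : List (String × List (String × String)) :=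
  -- for comb in range(1, n + 1): for item_comb in combinations(items, comb): d[key] = []
  let d1 : PySem.Dict String (List (String × String)) :=
    (PySem.List.pyRange 1 (n + 1)).foldl (fun d comb =>
      (PySem.List.combinations items comb.toNat).foldl (fun d c => d.insert (pvKey c) []) d)
      PySem.Dict.empty
  -- for bidder, bids in bidder_mapping.items(): for bid_key, bid_info in bids.items(): …
  -- bid_info["items"] ported as first-match lookup; the KeyError case is excluded by Pre_.
  let d2 :=
    bidder_mapping.foldl (fun d bb =>
      bb.2.foldl (fun d kb =>
        let bid_items_key := pvKey ((PySem.Dict.mk kb.2).getD "items" [])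
        if d.contains bid_items_key then d.modify bid_items_key [] (· ++ [(bb.1, kb.1)]) else d) d)
      d1
  d2.items

-- ===== PORT B =====
-- inner 'for j, x in enumerate(rest)' loop: rest[j+1:] is exactly the tail t here
def pvExpand (groups : PySem.Dict String (List (String × String))) (combo : List String) (rest : List String) (acc : List (List String × List String) × PySem.Dict String (List (String × String))) : List (List String × List String) × PySem.Dict String (List (String × String)) :=
  match rest with
  | [] => acc
  | x :: t =>
      let key := pvKey (combo ++ [x])
      pvExpand groups combo t (acc.1 ++ [(combo ++ [x], t)], acc.2.insert key (groups.getD key []))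

-- 'while frontier and rounds < n' with fuel = max(n,0)
def pvLoop (groups : PySem.Dict String (List (String × String))) : Nat → List (List String × List String) → PySem.Dict String (List (String × String)) → PySem.Dict String (List (String × String))
  | 0, _, result => result
  | fuel + 1, frontier, result =>
      if frontier = [] then result
      else
        let p := frontier.foldl (fun acc cr => pvExpand groups cr.1 cr.2 acc) ([], result)
        pvLoop groups fuel p.1 p.2

def items_to_bidders_mapping_alt (n : Int) (bidder_mapping : List (String × List (String × List (String × List String)))) (items : List String) : List (String × List (String × String)) :=
  -- groups.setdefault(key, []).append((bidder, bid_key))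
  let groups : PySem.Dict String (List (String × String)) :=
    bidder_mapping.foldl (fun g bb =>
      bb.2.foldl (fun g kb =>
        let key := pvKey ((PySem.Dict.mk kb.2).getD "items" [])
        g.modify key [] (· ++ [(bb.1, kb.1)])) g)
      PySem.Dict.empty
  (pvLoop groups n.toNat [([], items)] PySem.Dict.empty).items

-- ===== PRECONDITION & SPEC =====
-- Pre_ excludes only the inputs on which A raises KeyError: some bid_info without an "items" key.
def Pre_items_to_bidders_mapping (n : Int) (bidder_mapping : List (String × List (String × List (String × List String)))) (items : List String) : Prop :=
  ∀ bb ∈ bidder_mapping, ∀ kb ∈ bb.2, ((PySem.Dict.mk kb.2).get? "items").isSome = true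

instance (n : Int) (bidder_mapping : List (String × List (String × List (String × List String)))) (items : List String) : Decidable (Pre_items_to_bidders_mapping n bidder_mapping items) := by unfold Pre_items_to_bidders_mapping; infer_instance

def pvWitness_items_to_bidders_mapping : Int × (List (String × List (String × List (String × List String)))) × List String :=
  (2, [("b1", [("k1", [("items", ["a", "b"])])])], ["a", "b"])

def Spec_items_to_bidders_mapping (n : Int) (bidder_mapping : List (String × List (String × List (String × List String)))) (items : List String) (out : List (String × List (String × String))) : Prop := out = items_to_bidders_mapping_alt n bidder_mapping items
instance (n : Int) (bidder_mapping : List (String × List (String × List (String × List String)))) (items : List String) (out : List (String × List (String × String))) : Decidable (Spec_items_to_bidders_mapping n bidder_mapping items out) := by unfold Spec_items_to_bidders_mapping; infer_instance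

-- ===== CLAIM (what is proved, stated in full; the proofs are below) =====
def Claim_equal_items_to_bidders_mapping : Prop := ∀ (n : Int) (bidder_mapping : List (String × List (String × List (String × List String)))) (items : List String), Dom_items_to_bidders_mapping n bidder_mapping items → Pre_items_to_bidders_mapping n bidder_mapping items → Spec_items_to_bidders_mapping n bidder_mapping items (items_to_bidders_mapping n bidder_mapping items)

-- ===== LEMMAS AND PROOFS =====

-- the flattened bid list, each bid tagged with its item-set key
def pvAllB (bm : List (String × List (String × List (String × List String)))) : List (String × (String × String)) :=
  bm.flatMap (fun bb => bb.2.map (fun kb => (pvKey ((PySem.Dict.mk kb.2).getD "items" []), (bb.1, kb.1))))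


-- frontier machinery (proof-side mirror of B's loop)
def pvStep (c : List String) : List String → List (List String × List String)
  | [] => []
  | x :: t => (c ++ [x], t) :: pvStep c t

def pvFlat (F : List (List String × List String)) : List (List String × List String) :=
  F.flatMap (fun p => pvStep p.1 p.2)

def pvPairs : List String → Nat → List (List String × List String)
  | xs, 0 => [([], xs)]
  | [], _ + 1 => []
  | x :: t, k + 1 => (pvPairs t k).map (fun p => (x :: p.1, p.2)) ++ pvPairs t (k + 1)

theorem pvPairs_zero (xs : List String) : pvPairs xs 0 = [([], xs)] := by
  cases xs <;> rfl

theorem pvStep_map_prepend (x : String) (c : List String) (rest : List String) :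
    pvStep (x :: c) rest = (pvStep c rest).map (fun p => (x :: p.1, p.2)) := by
  induction rest with
  | nil => rfl
  | cons y t ih => simp [pvStep, ih]

theorem pvFlat_map_prepend (x : String) (F : List (List String × List String)) :
    pvFlat (F.map (fun p => (x :: p.1, p.2))) = (pvFlat F).map (fun p => (x :: p.1, p.2)) := by
  simp [pvFlat, List.flatMap_map, List.map_flatMap, pvStep_map_prepend]

theorem pvFlat_pairs (xs : List String) : ∀ k, pvFlat (pvPairs xs k) = pvPairs xs (k + 1) := by
  induction xs with
  | nil =>
      intro k
      cases k with
      | zero => rfl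
      | succ k => rfl
  | cons x t ih =>
      intro k
      cases k with
      | zero =>
          show pvFlat [([], x :: t)] = pvPairs (x :: t) 1
          have h0 : pvFlat [([], t)] = pvPairs t 1 := by
            have := ih 0
            rwa [pvPairs_zero] at this
          simp only [pvFlat, List.flatMap_cons, List.flatMap_nil, List.append_nil] at h0 ⊢
          simp [pvStep, pvPairs, h0, List.map_cons]
      | succ k =>
          show pvFlat ((pvPairs t k).map (fun p => (x :: p.1, p.2)) ++ pvPairs t (k + 1)) = pvPairs (x :: t) (k + 2)
          rw [pvFlat, List.flatMap_append, ← pvFlat, ← pvFlat, pvFlat_map_prepend, ih k, ih (k + 1)]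
          rfl

theorem pv_map_fst_pairs (xs : List String) : ∀ k, (pvPairs xs k).map (fun p => p.1) = PySem.List.combinations xs k := by
  induction xs with
  | nil =>
      intro k
      cases k with
      | zero => simp [pvPairs, PySem.List.combinations_zero]
      | succ k => simp [pvPairs, PySem.List.combinations_nil_succ]
  | cons x t ih =>
      intro k
      cases k with
      | zero => simp [pvPairs, PySem.List.combinations_zero]
      | succ k =>
          rw [PySem.List.combinations_cons_succ]
          simp only [pvPairs, List.map_append, List.map_map, ← ih k, ← ih (k + 1)]
          congr 1

theorem pvPairs_nil_step (xs : List String) (k : Nat) (h : pvPairs xs k = []) : pvPairs xs (k + 1) = [] := by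
  rw [← pvFlat_pairs, h]; rfl

theorem pvPairs_nil_ge (xs : List String) (k : Nat) (h : pvPairs xs k = []) : ∀ m, pvPairs xs (k + m) = [] := by
  intro m
  induction m with
  | zero => exact h
  | succ m ih => exact pvPairs_nil_step xs (k + m) ih

-- pvExpand emits pvStep and the corresponding inserts
theorem pvExpand_eq (g : PySem.Dict String (List (String × String))) (c : List String) (rest : List String) :
    ∀ a r, pvExpand g c rest (a, r)
      = (a ++ pvStep c rest,
         ((pvStep c rest).map (fun p => pvKey p.1)).foldl (fun r k => r.insert k (g.getD k [])) r) := by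
  induction rest with
  | nil => intro a r; simp [pvExpand, pvStep]
  | cons x t ih =>
      intro a r
      show pvExpand g c t (a ++ [(c ++ [x], t)], r.insert (pvKey (c ++ [x])) (g.getD (pvKey (c ++ [x])) []))
        = _
      rw [ih]
      simp [pvStep]

theorem pv_round (g : PySem.Dict String (List (String × String))) (F : List (List String × List String)) :
    ∀ a r, F.foldl (fun acc cr => pvExpand g cr.1 cr.2 acc) (a, r)
      = (a ++ pvFlat F,
         ((pvFlat F).map (fun p => pvKey p.1)).foldl (fun r k => r.insert k (g.getD k [])) r) := by
  induction F with
  | nil => intro a r; simp [pvFlat]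
  | cons cr t ih =>
      intro a r
      show List.foldl _ (pvExpand g cr.1 cr.2 (a, r)) t = _
      rw [pvExpand_eq, ih]
      simp [pvFlat, List.foldl_append]

def pvKS (xs : List String) (j fuel : Nat) : List String :=
  (List.range fuel).flatMap (fun i => (PySem.List.combinations xs (j + 1 + i)).map pvKey)

theorem pv_loop (g : PySem.Dict String (List (String × String))) (xs : List String) :
    ∀ fuel j r, pvLoop g fuel (pvPairs xs j) r
      = (pvKS xs j fuel).foldl (fun r k => r.insert k (g.getD k [])) r := by
  intro fuel
  induction fuel with
  | zero => intro j r; rfl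
  | succ fuel ih =>
      intro j r
      by_cases h : pvPairs xs j = []
      · have hks : pvKS xs j (fuel + 1) = [] := by
          simp only [pvKS, List.flatMap_eq_nil_iff]
          intro i _
          have : pvPairs xs (j + (1 + i)) = [] := pvPairs_nil_ge xs j h (1 + i)
          rw [← pv_map_fst_pairs]
          rw [show j + 1 + i = j + (1 + i) by omega, this]
          simp
        rw [hks]
        simp [pvLoop, h]
      · have hsplit : pvKS xs j (fuel + 1)
            = (PySem.List.combinations xs (j + 1)).map pvKey ++ pvKS xs (j + 1) fuel := by
          have hfe : (fun a => List.map pvKey (PySem.List.combinations xs (j + 1 + (a + 1))))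
              = (fun i => List.map pvKey (PySem.List.combinations xs (j + 1 + 1 + i))) := by
            funext i
            rw [show j + 1 + (i + 1) = j + 1 + 1 + i from by omega]
          rw [pvKS, List.range_succ_eq_map, List.flatMap_cons, List.flatMap_map, pvKS, hfe]
        rw [hsplit, List.foldl_append]
        simp only [pvLoop, if_neg h]
        rw [pv_round]
        simp only [List.nil_append, pvFlat_pairs]
        rw [show ((pvPairs xs (j + 1)).map (fun p => pvKey p.1))
              = (PySem.List.combinations xs (j + 1)).map pvKey by
            rw [← pv_map_fst_pairs, List.map_map]; rfl]
        exact ih (j + 1) _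


-- flattening A's two nested bid loops
theorem pvA_flat (bm : List (String × List (String × List (String × List String)))) :
    ∀ d1 : PySem.Dict String (List (String × String)),
    bm.foldl (fun d bb => bb.2.foldl (fun d kb =>
        let key := pvKey ((PySem.Dict.mk kb.2).getD "items" [])
        if d.contains key then d.modify key [] (· ++ [(bb.1, kb.1)]) else d) d) d1
      = (pvAllB bm).foldl (fun d p => if d.contains p.1 then d.modify p.1 [] (· ++ [p.2]) else d) d1 := by
  induction bm with
  | nil => intro d1; rfl
  | cons bb t ih =>
      intro d1
      simp only [List.foldl_cons, pvAllB, List.flatMap_cons, List.foldl_append, List.foldl_map]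
      rw [← pvAllB, ih]

-- flattening B's grouping loop
theorem pvB_groups (bm : List (String × List (String × List (String × List String)))) :
    ∀ g0 : PySem.Dict String (List (String × String)),
    bm.foldl (fun g bb => bb.2.foldl (fun g kb =>
        let key := pvKey ((PySem.Dict.mk kb.2).getD "items" [])
        g.modify key [] (· ++ [(bb.1, kb.1)])) g) g0
      = (pvAllB bm).foldl (fun d p => d.modify p.1 [] (· ++ [p.2])) g0 := by
  induction bm with
  | nil => intro g0; rfl
  | cons bb t ih =>
      intro g0
      simp only [List.foldl_cons, pvAllB, List.flatMap_cons, List.foldl_append, List.foldl_map]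
      rw [← pvAllB, ih]

-- flattening A's phase-1 enumeration
theorem pvA_init (items : List String) (L : List Int) :
    ∀ d0 : PySem.Dict String (List (String × String)),
    L.foldl (fun d comb => (PySem.List.combinations items comb.toNat).foldl (fun d c => d.insert (pvKey c) []) d) d0
      = (L.flatMap (fun comb => (PySem.List.combinations items comb.toNat).map pvKey)).foldl (fun d k => d.insert k []) d0 := by
  induction L with
  | nil => intro d0; rfl
  | cons a t ih => intro d0; simp only [List.foldl_cons, List.flatMap_cons, List.foldl_append, List.foldl_map, ih]

theorem pv_pyRange_succ : ∀ m : Nat, PySem.List.pyRange 1 ((m : Int) + 1) = (List.range m).map (fun i : Nat => ((i : Int) + 1))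
  | 0 => by norm_num
  | m + 1 => by
      rw [show (((m + 1 : Nat) : Int) + 1) = (((m : Nat) : Int) + 1) + 1 from by push_cast; ring,
          PySem.List.pyRange_one_succ_right (by omega), pv_pyRange_succ m,
          List.range_succ, List.map_append]
      rfl

theorem pv_pyRange_int (n : Int) : PySem.List.pyRange 1 (n + 1) = (List.range n.toNat).map (fun i : Nat => ((i : Int) + 1)) := by
  by_cases h : 0 ≤ n
  · have := pv_pyRange_succ n.toNat
    rwa [Int.toNat_of_nonneg h] at this
  · rw [show n.toNat = 0 from by omega]
    simp [PySem.List.pyRange]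
    omega

theorem pv_ks_eq (items : List String) (m : Nat) :
    ((List.range m).map (fun i : Nat => ((i : Int) + 1))).flatMap (fun comb => (PySem.List.combinations items comb.toNat).map pvKey)
      = pvKS items 0 m := by
  rw [pvKS]
  simp only [List.flatMap_map]
  have hfe : (fun a : Nat => (PySem.List.combinations items (((a : Int) + 1)).toNat).map pvKey)
      = (fun i : Nat => (PySem.List.combinations items (0 + 1 + i)).map pvKey) := by
    funext i
    rw [show (((i : Int) + 1)).toNat = 0 + 1 + i from by omega]
  rw [hfe]

-- phase 2 of A: values grow by the matching bids; keys unchanged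
theorem pv_phase2_getD (l : List (String × (String × String))) :
    ∀ (d : PySem.Dict String (List (String × String))) (k : String),
    (l.foldl (fun d p => if d.contains p.1 then d.modify p.1 [] (· ++ [p.2]) else d) d).getD k []
      = if d.contains k then d.getD k [] ++ (l.filter (fun p => p.1 == k)).map (·.2) else d.getD k [] := by
  induction l with
  | nil => intro d k; split <;> simp
  | cons p t ih =>
      intro d k
      simp only [List.foldl_cons]
      by_cases hc : d.contains p.1 = true
      · rw [if_pos hc, ih]
        by_cases hk : k = p.1
        · subst hk
          simp [PySem.Dict.contains_modify, hc]
        · have hne : (p.1 == k) = false := by simpa using Ne.symm hk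
          simp [PySem.Dict.contains_modify, PySem.Dict.getD_modify, hk, hne]
      · rw [if_neg hc, ih]
        by_cases hk : k = p.1
        · subst hk
          simp [hc]
        · have hne : (p.1 == k) = false := by simpa using Ne.symm hk
          simp [hne]

theorem pv_phase2_keys (l : List (String × (String × String))) :
    ∀ d : PySem.Dict String (List (String × String)),
    (l.foldl (fun d p => if d.contains p.1 then d.modify p.1 [] (· ++ [p.2]) else d) d).keys = d.keys := by
  induction l with
  | nil => intro d; rfl
  | cons p t ih =>
      intro d
      simp only [List.foldl_cons]
      rw [ih]
      by_cases hc : d.contains p.1 = true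
      · rw [if_pos hc, PySem.Dict.keys_modify, PySem.Dict.keys_insert_of_contains d _ hc]
      · rw [if_neg hc]

-- a fold of inserts whose value depends only on the key
theorem pv_foldl_insert_getD (F : String → List (String × String)) :
    ∀ (ks : List String) (d : PySem.Dict String (List (String × String))) (k : String),
    (ks.foldl (fun d key => d.insert key (F key)) d).getD k [] = if k ∈ ks then F k else d.getD k [] := by
  intro ks
  induction ks with
  | nil => intro d k; simp
  | cons x t ih =>
      intro d k
      simp only [List.foldl_cons, ih]
      by_cases hm : k ∈ t
      · simp [hm]
      · by_cases hk : k = x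
        · subst hk
          simp [hm]
        · simp [hm, hk, PySem.Dict.getD_insert]

-- the central dict identity: init-then-append equals insert-from-group-index
theorem pv_dicts_eq (l : List (String × (String × String))) (ks : List String) :
    (l.foldl (fun d p => if d.contains p.1 then d.modify p.1 [] (· ++ [p.2]) else d)
       (ks.foldl (fun d k => d.insert k ([] : List (String × String))) PySem.Dict.empty)).items
      = (ks.foldl (fun r k => r.insert k ((l.foldl (fun d p => d.modify p.1 [] (· ++ [p.2])) PySem.Dict.empty).getD k [])) PySem.Dict.empty).items := by
  have hk1 : (ks.foldl (fun d k => d.insert k ([] : List (String × String))) PySem.Dict.empty).keys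
      = PySem.Set.update [] ks := by
    have h := PySem.Dict.keys_foldl_insert (ν := List (String × String)) ks (fun _ _ => []) PySem.Dict.empty
    rw [PySem.Dict.keys_empty] at h
    exact h
  have hnd1 : (ks.foldl (fun d k => d.insert k ([] : List (String × String))) PySem.Dict.empty).keys.Nodup :=
    PySem.Dict.nodup_keys_foldl_insert ks (fun _ _ => []) _ PySem.Dict.nodup_keys_empty
  have hkR : (ks.foldl (fun r k => r.insert k ((l.foldl (fun d p => d.modify p.1 [] (· ++ [p.2])) PySem.Dict.empty).getD k [])) PySem.Dict.empty).keys
      = PySem.Set.update [] ks := by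
    have h := PySem.Dict.keys_foldl_insert (ν := List (String × String)) ks
      (fun _ k => (l.foldl (fun d p => d.modify p.1 [] (· ++ [p.2])) PySem.Dict.empty).getD k []) PySem.Dict.empty
    rw [PySem.Dict.keys_empty] at h
    exact h
  have hndR : (ks.foldl (fun r k => r.insert k ((l.foldl (fun d p => d.modify p.1 [] (· ++ [p.2])) PySem.Dict.empty).getD k [])) PySem.Dict.empty).keys.Nodup :=
    PySem.Dict.nodup_keys_foldl_insert ks
      (fun _ k => (l.foldl (fun d p => d.modify p.1 [] (· ++ [p.2])) PySem.Dict.empty).getD k []) _ PySem.Dict.nodup_keys_empty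
  have hnd2 : (l.foldl (fun d p => if d.contains p.1 then d.modify p.1 [] (· ++ [p.2]) else d)
       (ks.foldl (fun d k => d.insert k ([] : List (String × String))) PySem.Dict.empty)).keys.Nodup := by
    rw [pv_phase2_keys]; exact hnd1
  rw [PySem.Dict.items_eq_map_keys _ hnd2 [], PySem.Dict.items_eq_map_keys _ hndR []]
  rw [pv_phase2_keys, hk1, hkR]
  apply List.map_congr_left
  intro k hk
  have hks : k ∈ ks := by
    have := (PySem.Set.mem_update ([] : PySem.Set String) ks k).mp hk
    simpa using this
  have hc : (ks.foldl (fun d k => d.insert k ([] : List (String × String))) PySem.Dict.empty).contains k = true := by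
    rw [PySem.Dict.contains_iff_mem_keys, hk1]
    exact hk
  rw [pv_phase2_getD, if_pos hc, pv_foldl_insert_getD (fun _ => ([] : List (String × String))),
      pv_foldl_insert_getD (fun k => (l.foldl (fun d p => d.modify p.1 [] (· ++ [p.2])) PySem.Dict.empty).getD k []),
      if_pos hks, if_pos hks, PySem.Dict.getD_foldl_modify_append, PySem.Dict.getD_empty]

-- ===== VERDICT (by name: the statement is the Claim_ definition above) =====
theorem items_to_bidders_mapping_spec : Claim_equal_items_to_bidders_mapping := by
  unfold Claim_equal_items_to_bidders_mapping
  intro n bm items _ _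
  unfold Spec_items_to_bidders_mapping items_to_bidders_mapping items_to_bidders_mapping_alt
  simp only [pvA_flat, pvB_groups, pvA_init, pv_pyRange_int, pv_ks_eq]
  rw [show ([(([] : List String), items)] : List (List String × List String)) = pvPairs items 0 from (pvPairs_zero items).symm,
      pv_loop]
  exact pv_dicts_eq (pvAllB bm) (pvKS items 0 n.toNat)
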